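-- pv_equiv track=rewrite | github.com/JamesG419/sensemaking | sensemaking/dataset.py | categorize_cell
-- ===== SOURCE A (Python) =====
-- def categorize_cell(data):
--     output = ""
--     if data["empty"]:
--         return "Empty"
--     if all(not x for x in data.values()):
--         return "No Links"
--     if data["NEW"] > 0:
--         output = f"NEW{output}"
--     if data["@"] > 0 and data["@"] <= 1:
--         output = f"{output} Account"
--     if data["@"] > 1:
--         output = f"{output} Account Account"
--     if data[">"] > 0:
--         output = f"{output} BEND"
--     if data["+"] > 0 and data["+"] <= 1:
--         output = f"{output} Tag"
--     if data["+"] > 1: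
--         output = f"{output} Tag Tag"
--     if data["&"] > 0 and data["&"] <= 1:
--         output = f"{output} Group"
--     if data["&"] > 1:
--         output = f"{output} Group Group"
--     if data["~"] > 0:
--         output = f"{output} Class"
--
--     return output
-- ===== SOURCE B (Python) =====
-- # Different algorithm: iterate the input dict once, map each flag via a rank/label/cap
-- # table to a (rank, fragment) pair, sort the fragments by rank, and concatenate them.
-- _SPEC = {"NEW": (0, "NEW", 1), "@": (1, " Account", 2), ">": (2, " BEND", 1),
--          "+": (3, " Tag", 2), "&": (4, " Group", 2), "~": (5, " Class", 1)}
--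
-- def categorize_cell(data):
--     if data["empty"]:
--         return "Empty"
--     if not any(data.values()):
--         return "No Links"
--     frags = sorted(((_SPEC[k][0], _SPEC[k][1] * min(v, _SPEC[k][2]))
--                     for k, v in data.items() if k in _SPEC and v > 0),
--                    key=lambda t: t[0])
--     out = ""
--     for _, f in frags:
--         out += f
--     return out
-- ===== Notes on version B (the rewrite author's own statement) =====
-- stated objective: alternative
-- what changed: Instead of A's fixed chain of nine per-key ifs, B makes one pass over the input dict, maps each positive flag through a rank/label/cap table to a (rank, fragment) pair with capped string repetition, sorts the fragments by rank and concatenates them; the two early returns are kept.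
import Mathlib
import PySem

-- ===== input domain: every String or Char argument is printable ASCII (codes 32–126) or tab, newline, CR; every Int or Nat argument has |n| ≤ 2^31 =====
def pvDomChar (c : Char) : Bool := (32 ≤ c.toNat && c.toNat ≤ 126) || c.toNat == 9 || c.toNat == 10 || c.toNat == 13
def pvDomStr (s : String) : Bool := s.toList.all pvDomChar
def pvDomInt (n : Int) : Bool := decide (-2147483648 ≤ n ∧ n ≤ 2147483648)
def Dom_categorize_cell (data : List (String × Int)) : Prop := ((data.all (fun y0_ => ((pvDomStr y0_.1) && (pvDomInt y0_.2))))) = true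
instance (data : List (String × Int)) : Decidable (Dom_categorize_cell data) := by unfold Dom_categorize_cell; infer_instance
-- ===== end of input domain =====

-- B replaces A's fixed chain of per-key ifs by a single pass over the input dict: each flag
-- is mapped through a rank/label/cap table to a (rank, fragment) pair, the fragments are
-- sorted by rank and concatenated; objective: alternative algorithm, same output strings.

-- ===== PORT A =====
def categorize_cell (data : List (String × Int)) : String :=
  let d := PySem.Dict.mk data
  let output := ""
  if d.getD "empty" 0 ≠ 0 then "Empty"
  else if (PySem.Dict.values d).all (fun x => x == 0) then "No Links"
  else
    let output := if d.getD "NEW" 0 > 0 then "NEW" ++ output else output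
    let output := if d.getD "@" 0 > 0 ∧ d.getD "@" 0 ≤ 1 then output ++ " Account" else output
    let output := if d.getD "@" 0 > 1 then output ++ " Account Account" else output
    let output := if d.getD ">" 0 > 0 then output ++ " BEND" else output
    let output := if d.getD "+" 0 > 0 ∧ d.getD "+" 0 ≤ 1 then output ++ " Tag" else output
    let output := if d.getD "+" 0 > 1 then output ++ " Tag Tag" else output
    let output := if d.getD "&" 0 > 0 ∧ d.getD "&" 0 ≤ 1 then output ++ " Group" else output
    let output := if d.getD "&" 0 > 1 then output ++ " Group Group" else output
    let output := if d.getD "~" 0 > 0 then output ++ " Class" else output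
    output

-- ===== PORT B =====
-- Source B's _SPEC table: key -> (rank, label, cap)
def specTable : PySem.Dict String (Int × String × Int) :=
  PySem.Dict.mk [("NEW", (0, "NEW", 1)), ("@", (1, " Account", 2)), (">", (2, " BEND", 1)),
                 ("+", (3, " Tag", 2)), ("&", (4, " Group", 2)), ("~", (5, " Class", 1))]

-- Python's `s * n` on strings: n concatenations, "" for n ≤ 0 (exact; only used with n ≥ 1 here)
def pyStrMul (s : String) (n : Int) : String := (List.replicate n.toNat s).foldl (· ++ ·) ""

def categorize_cell_alt (data : List (String × Int)) : String :=
  let d := PySem.Dict.mk data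
  if d.getD "empty" 0 ≠ 0 then "Empty"
  else if !((PySem.Dict.values d).any (fun x => x != 0)) then "No Links"
  else
    let frags := PySem.List.sorted
      ((d.items.filter (fun p => specTable.contains p.1 && decide (p.2 > 0))).map
        (fun p =>
          let e := specTable.getD p.1 (0, "", 0)
          (e.1, pyStrMul e.2.1 (min p.2 e.2.2))))
      (fun t => t.1)
    frags.foldl (fun out t => out ++ t.2) ""

-- ===== PRECONDITION & SPEC =====
-- Pre_ excludes (a) assoc lists with duplicate keys, which a Python dict argument cannot even
-- represent (so no input A returns on is lost), and (b) exactly the inputs on which A raises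
-- KeyError: "empty" missing, or one of the six flag keys missing while "empty" is falsy and not
-- all values are zero (past the two early returns A reads every flag key unconditionally).
def Pre_categorize_cell (data : List (String × Int)) : Prop :=
  (data.map Prod.fst).Nodup ∧ "empty" ∈ data.map Prod.fst ∧
  (PySem.Dict.getD (PySem.Dict.mk data) "empty" 0 ≠ 0 ∨
   (∀ v ∈ data.map Prod.snd, v = 0) ∨
   (∀ k ∈ (["NEW", "@", ">", "+", "&", "~"] : List String), k ∈ data.map Prod.fst))
instance (data : List (String × Int)) : Decidable (Pre_categorize_cell data) := by
  unfold Pre_categorize_cell; infer_instance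

def pvWitness_categorize_cell : (List (String × Int)) :=
  [("empty", 0), ("NEW", 1), ("@", 2), (">", 1), ("+", 0), ("&", 1), ("~", 0)]

def Spec_categorize_cell (data : List (String × Int)) (out : String) : Prop := out = categorize_cell_alt data
instance (data : List (String × Int)) (out : String) : Decidable (Spec_categorize_cell data out) := by unfold Spec_categorize_cell; infer_instance

-- ===== CLAIM (what is proved, stated in full; the proofs are below) =====
def Claim_equal_categorize_cell : Prop := ∀ (data : List (String × Int)), Dom_categorize_cell data → Pre_categorize_cell data → Spec_categorize_cell data (categorize_cell data)

-- ===== LEMMAS AND PROOFS =====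

-- the six flag keys, in A's (= rank) order
def specKeys : List String := ["NEW", "@", ">", "+", "&", "~"]

lemma specTable_contains (x : String) : specTable.contains x = specKeys.contains x := by
  simp only [specTable, specKeys, PySem.Dict.contains, List.contains_eq_any_beq, List.any_cons,
    List.any_nil]
  rw [Bool.eq_iff_iff]
  simp only [Bool.or_eq_true, beq_iff_eq, Bool.false_eq_true, or_false]
  constructor <;> rintro (h | h | h | h | h | h) <;> simp [h]

lemma pyStrMul_one (s : String) : pyStrMul s 1 = s := by
  simp [pyStrMul, String.empty_append]

lemma pyStrMul_two (s : String) : pyStrMul s 2 = s ++ s := by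
  simp [pyStrMul, String.empty_append]

-- Python's `not any(values)` equals A's `all(not x for x in values)` on ints
lemma not_any_ne_eq_all_eq (l : List Int) :
    (!(l.any (fun x => x != 0))) = (l.all (fun x => x == 0)) := by
  induction l with
  | nil => rfl
  | cons a t ih =>
    rw [List.any_cons, List.all_cons, Bool.not_or, ih]
    simp [bne]

-- the entries of `data` whose key lies in `ks` are, up to order, one entry per key of `ks`,
-- carrying the dict lookup of that key (keys of `data` distinct, every key of `ks` present)
lemma filter_mem_perm (ks : List String) (data : List (String × Int))
    (hnd : (data.map Prod.fst).Nodup) (hks : ks.Nodup)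
    (hall : ∀ k ∈ ks, k ∈ data.map Prod.fst) :
    (data.filter (fun p => ks.contains p.1)).Perm
      (ks.map (fun k => (k, (PySem.Dict.mk data).getD k 0))) := by
  induction ks generalizing data with
  | nil => simp
  | cons k ks ih =>
    obtain ⟨w, hw⟩ : ∃ w, (k, w) ∈ data := by
      obtain ⟨p, hp, rfl⟩ := List.mem_map.1 (hall k (by simp))
      exact ⟨p.2, hp⟩
    have hperm : data.Perm ((k, w) :: data.erase (k, w)) := List.perm_cons_erase hw
    have hkeysperm : (data.map Prod.fst).Perm (k :: (data.erase (k, w)).map Prod.fst) :=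
      hperm.map _
    have hnd' : (k :: (data.erase (k, w)).map Prod.fst).Nodup := hkeysperm.nodup_iff.1 hnd
    have hknotin : k ∉ (data.erase (k, w)).map Prod.fst := (List.nodup_cons.1 hnd').1
    have hndrest : ((data.erase (k, w)).map Prod.fst).Nodup := (List.nodup_cons.1 hnd').2
    have hkninks : k ∉ ks := (List.nodup_cons.1 hks).1
    have hall' : ∀ k' ∈ ks, k' ∈ (data.erase (k, w)).map Prod.fst := by
      intro k' hk'
      have h2 := hkeysperm.mem_iff.1 (hall k' (List.mem_cons_of_mem _ hk'))
      rw [List.mem_cons] at h2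
      rcases h2 with h2 | h2
      · exact absurd (h2 ▸ hk') hkninks
      · exact h2
    have hfc : (data.erase (k, w)).filter (fun p => (k :: ks).contains p.1)
        = (data.erase (k, w)).filter (fun p => ks.contains p.1) := by
      refine List.filter_congr fun p hp => ?_
      have hmem : p.1 ∈ (data.erase (k, w)).map Prod.fst := List.mem_map_of_mem hp
      have hpk : p.1 ≠ k := fun h => hknotin (h ▸ hmem)
      simp only [List.contains_eq_any_beq, List.any_cons]
      rw [show (p.1 == k) = false from beq_eq_false_iff_ne.2 hpk]
      simp
    have hgd : ∀ k' ∈ ks,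
        (PySem.Dict.mk (data.erase (k, w))).getD k' 0 = (PySem.Dict.mk data).getD k' 0 := by
      intro k' hk'
      obtain ⟨p, hp, rfl⟩ := List.mem_map.1 (hall' k' hk')
      have hpd : p ∈ data := List.mem_of_mem_erase hp
      rw [PySem.Dict.getD_of_mem_items (PySem.Dict.mk (data.erase (k, w)))
            (by exact hp) hndrest,
          PySem.Dict.getD_of_mem_items (PySem.Dict.mk data) (by exact hpd) hnd]
    have hmapeq : ks.map (fun k' => (k', (PySem.Dict.mk data).getD k' 0))
        = ks.map (fun k' => (k', (PySem.Dict.mk (data.erase (k, w))).getD k' 0)) :=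
      List.map_congr_left fun k' hk' => by rw [hgd k' hk']
    have hd0 : (PySem.Dict.mk data).getD k 0 = w :=
      PySem.Dict.getD_of_mem_items (PySem.Dict.mk data) (by exact hw) hnd 0
    refine (hperm.filter _).trans ?_
    rw [List.filter_cons, if_pos (by simp), hfc, List.map_cons, hd0, hmapeq]
    exact List.Perm.cons _ (ih _ hndrest (List.nodup_cons.1 hks).2 hall')

-- a single-cap flag step: B's capped repetition equals A's plain append
lemma step_cap1 (out lab : String) (v : Int) :
    (if 0 < v then out ++ pyStrMul lab (min v 1) else out)
      = if 0 < v then out ++ lab else out := by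
  by_cases h : 0 < v
  · have : min v 1 = 1 := by omega
    rw [if_pos h, if_pos h, this, pyStrMul_one]
  · rw [if_neg h, if_neg h]

-- a doubled-cap flag step: B's one capped-repetition step equals A's two ifs
lemma step_cap2 (out lab : String) (v : Int) :
    (if 0 < v then out ++ pyStrMul lab (min v 2) else out)
      = if 1 < v then (if 0 < v ∧ v ≤ 1 then out ++ lab else out) ++ (lab ++ lab)
        else (if 0 < v ∧ v ≤ 1 then out ++ lab else out) := by
  rcases lt_trichotomy v 1 with h | h | h
  · have h1 : ¬ 1 < v := by omega
    have h2 : ¬ (0 < v ∧ v ≤ 1) := by omega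
    have h3 : ¬ 0 < v := by omega
    rw [if_neg h1, if_neg h2, if_neg h3]
  · subst h
    norm_num [pyStrMul_one]
  · have h1 : ¬ (0 < v ∧ v ≤ 1) := by omega
    have h2 : min v 2 = 2 := by omega
    rw [if_pos (by omega : (0:Int) < v), if_pos h, if_neg h1, h2, pyStrMul_two,
        ← String.append_assoc]

-- B's sorted/filter/map pipeline over the input equals a conditional fold over the six keys
lemma pipeline_eq_fold (data : List (String × Int))
    (hnd : (data.map Prod.fst).Nodup)
    (hall : ∀ k ∈ specKeys, k ∈ data.map Prod.fst) :
    (PySem.List.sorted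
      (((PySem.Dict.mk data).items.filter
          (fun p => specTable.contains p.1 && decide (p.2 > 0))).map
        (fun p =>
          let e := specTable.getD p.1 (0, "", 0)
          (e.1, pyStrMul e.2.1 (min p.2 e.2.2))))
      (fun t => t.1)).foldl (fun out t => out ++ t.2) ""
    = specKeys.foldl
        (fun out k =>
          if (PySem.Dict.mk data).getD k 0 > 0 then
            out ++ pyStrMul ((specTable.getD k (0, "", 0)).2.1)
              (min ((PySem.Dict.mk data).getD k 0) ((specTable.getD k (0, "", 0)).2.2))
          else out) "" := by
  have hitems : (PySem.Dict.mk data).items = data := rfl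
  set F : (String × Int) → Int × String := fun p =>
    ((specTable.getD p.1 (0, "", 0)).1,
      pyStrMul ((specTable.getD p.1 (0, "", 0)).2.1) (min p.2 ((specTable.getD p.1 (0, "", 0)).2.2)))
    with hF
  set pairf : String → String × Int := fun k => (k, (PySem.Dict.mk data).getD k 0) with hpairf
  have hfc : data.filter (fun p => specTable.contains p.1 && decide (p.2 > 0))
      = (data.filter (fun p => specKeys.contains p.1)).filter (fun p => decide (p.2 > 0)) := by
    rw [List.filter_filter]
    exact List.filter_congr fun p _ => by rw [specTable_contains, Bool.and_comm]
  have hperm : ((data.filter (fun p => specTable.contains p.1 && decide (p.2 > 0))).map F).Perm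
      (((specKeys.map pairf).filter (fun p => decide (p.2 > 0))).map F) := by
    rw [hfc]
    exact ((filter_mem_perm specKeys data hnd (by decide) hall).filter _).map F
  have hC : ((specKeys.map pairf).filter (fun p => decide (p.2 > 0))).map F
      = (specKeys.filter (fun k => decide ((pairf k).2 > 0))).map (fun k => F (pairf k)) := by
    rw [List.filter_map, List.map_map]
    rfl
  have hpw : (((specKeys.map pairf).filter (fun p => decide (p.2 > 0))).map F).Pairwise
      (fun a b => a.1 < b.1) := by
    rw [hC, List.pairwise_map]
    refine List.Pairwise.sublist List.filter_sublist ?_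
    simp only [hF, hpairf]
    decide
  have hsorted : PySem.List.sorted
      ((data.filter (fun p => specTable.contains p.1 && decide (p.2 > 0))).map F) (fun t => t.1)
      = ((specKeys.map pairf).filter (fun p => decide (p.2 > 0))).map F :=
    PySem.List.sorted_eq_of_perm_of_pairwise_lt _ _ _ hperm.symm hpw
  rw [hitems, hsorted, hC, List.foldl_map, List.foldl_filter]
  simp only [hF, hpairf, decide_eq_true_eq]

-- ===== VERDICT (by name: the statement is the Claim_ definition above) =====
theorem categorize_cell_spec : Claim_equal_categorize_cell := by
  intro data _ hpre
  obtain ⟨hnd, hemp, hdisj⟩ := hpre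
  unfold Spec_categorize_cell categorize_cell categorize_cell_alt
  by_cases h1 : (PySem.Dict.mk data).getD "empty" 0 ≠ 0
  · rw [if_pos h1, if_pos h1]
  · rw [if_neg h1, if_neg h1, not_any_ne_eq_all_eq]
    by_cases h2 : ((PySem.Dict.mk data).values.all fun x => x == 0) = true
    · rw [if_pos h2, if_pos h2]
    · rw [if_neg h2, if_neg h2]
      have hall : ∀ k ∈ specKeys, k ∈ data.map Prod.fst := by
        rcases hdisj with hd | hd | hd
        · exact absurd hd h1
        · exact absurd (List.all_eq_true.2 fun x hx => beq_iff_eq.2 (hd x hx)) h2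
        · exact hd
      rw [pipeline_eq_fold data hnd hall]
      have eN1 : (specTable.getD "NEW" (0, "", 0)).2.1 = "NEW" := rfl
      have eN2 : (specTable.getD "NEW" (0, "", 0)).2.2 = 1 := rfl
      have eA1 : (specTable.getD "@" (0, "", 0)).2.1 = " Account" := rfl
      have eA2 : (specTable.getD "@" (0, "", 0)).2.2 = 2 := rfl
      have eB1 : (specTable.getD ">" (0, "", 0)).2.1 = " BEND" := rfl
      have eB2 : (specTable.getD ">" (0, "", 0)).2.2 = 1 := rfl
      have eT1 : (specTable.getD "+" (0, "", 0)).2.1 = " Tag" := rfl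
      have eT2 : (specTable.getD "+" (0, "", 0)).2.2 = 2 := rfl
      have eG1 : (specTable.getD "&" (0, "", 0)).2.1 = " Group" := rfl
      have eG2 : (specTable.getD "&" (0, "", 0)).2.2 = 2 := rfl
      have eC1 : (specTable.getD "~" (0, "", 0)).2.1 = " Class" := rfl
      have eC2 : (specTable.getD "~" (0, "", 0)).2.2 = 1 := rfl
      simp only [specKeys, List.foldl_cons, List.foldl_nil, gt_iff_lt,
        eN1, eN2, eA1, eA2, eB1, eB2, eT1, eT2, eG1, eG2, eC1, eC2]
      rw [show (" Account Account" : String) = " Account" ++ " Account" from rfl,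
          show (" Tag Tag" : String) = " Tag" ++ " Tag" from rfl,
          show (" Group Group" : String) = " Group" ++ " Group" from rfl]
      rw [step_cap1 (lab := "NEW"), step_cap2 (lab := " Account"),
          step_cap1 (lab := " BEND"), step_cap2 (lab := " Tag"),
          step_cap2 (lab := " Group"), step_cap1 (lab := " Class")]
      rw [show ("" : String) ++ "NEW" = "NEW" ++ "" from rfl]
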